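-- pv_equiv track=rewrite | github.com/henriquemmartins2823-lgtm/Yacht-Dice | funcoes.py | calcula_pontos_regra_simples
-- ===== SOURCE A (Python) =====
-- def calcula_pontos_regra_simples(x):
--     dic={}
--     valores=[1,2,3,4,5,6]
--     for valor in valores:
--         if valor not in x:
--             dic[valor]=0
--         else:
--             d=x.count(valor)
--             dic[valor]=d*valor
--     return dic
-- ===== SOURCE B (Python) =====
-- def calcula_pontos_regra_simples(x):
--     dic = {v: 0 for v in (1, 2, 3, 4, 5, 6)}
--     ys = sorted(x)
--     n = len(ys)
--     i = 0
--     while i < n: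
--         v = ys[i]
--         j = i + 1
--         while j < n and ys[j] == v:
--             j += 1
--         if v in dic:
--             dic[v] = (j - i) * v
--         i = j
--     return dic
-- ===== Notes on version B (the rewrite author's own statement) =====
-- stated objective: alternative
-- what changed: B sorts x and does one run-length scan over the sorted list, scoring each run of a face 1..6 as run_length*face into a zero-initialized dict, instead of A's six membership/count scans of x.
import Mathlib
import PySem

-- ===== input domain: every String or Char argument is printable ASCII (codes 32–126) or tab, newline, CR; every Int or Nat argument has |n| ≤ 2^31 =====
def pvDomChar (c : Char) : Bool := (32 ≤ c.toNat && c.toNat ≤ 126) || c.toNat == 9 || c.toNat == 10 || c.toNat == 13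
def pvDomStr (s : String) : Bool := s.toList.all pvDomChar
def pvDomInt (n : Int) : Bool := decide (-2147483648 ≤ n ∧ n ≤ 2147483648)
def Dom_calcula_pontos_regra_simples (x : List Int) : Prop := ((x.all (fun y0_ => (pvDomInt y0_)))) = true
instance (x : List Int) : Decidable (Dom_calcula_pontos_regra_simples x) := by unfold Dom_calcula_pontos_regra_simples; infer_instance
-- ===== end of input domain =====

-- B sorts x and scores each run of equal faces by run_length*face in one scan, instead of A's six membership/count scans of x.

-- ===== PORT A =====
def calcula_pontos_regra_simples (x : List Int) : List (Int × Int) :=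
  (([1, 2, 3, 4, 5, 6] : List Int).foldl
    (fun dic valor =>
      if !(x.contains valor) then dic.insert valor 0
      else dic.insert valor ((PySem.List.count x valor : Int) * valor))
    PySem.Dict.empty).items

-- ===== PORT B =====
-- B's inner 'while j < n and ys[j] == v: j += 1' loop
def pvInnerB (ys : List Int) (n : Nat) (v : Int) (j : Nat) : Nat :=
  if h : j < n ∧ ys.getD j 0 = v then pvInnerB ys n v (j + 1) else j
termination_by n - j
decreasing_by omega

-- needed by pvRunLoopB's termination: the inner while never moves j backwards
theorem pvInnerB_ge_n : ∀ (k : Nat) (ys : List Int) (n : Nat) (v : Int) (j : Nat),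
    n - j ≤ k → j ≤ pvInnerB ys n v j := by
  intro k
  induction k with
  | zero =>
    intro ys n v j h
    rw [pvInnerB]
    split
    · omega
    · exact Nat.le_refl _
  | succ m ih =>
    intro ys n v j h
    rw [pvInnerB]
    split
    · rename_i hc
      have := ih ys n v (j + 1) (by omega)
      omega
    · exact Nat.le_refl _

theorem pvInnerB_ge (ys : List Int) (n : Nat) (v : Int) (j : Nat) :
    j ≤ pvInnerB ys n v j :=
  pvInnerB_ge_n (n - j) ys n v j (Nat.le_refl _)

-- B's outer 'while i < n:' loop
def pvRunLoopB (ys : List Int) (n : Nat) (i : Nat) (dic : PySem.Dict Int Int) :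
    PySem.Dict Int Int :=
  -- v = ys[i]; j = the inner while's final index; then 'if v in dic: dic[v] = (j-i)*v'
  if _h : i < n then
    pvRunLoopB ys n (pvInnerB ys n (ys.getD i 0) (i + 1))
      (if dic.contains (ys.getD i 0)
       then dic.insert (ys.getD i 0)
         (((pvInnerB ys n (ys.getD i 0) (i + 1) : Int) - (i : Int)) * ys.getD i 0)
       else dic)
  else dic
termination_by n - i
decreasing_by
  have := pvInnerB_ge ys n (ys.getD i 0) (i + 1)
  omega

def calcula_pontos_regra_simples_alt (x : List Int) : List (Int × Int) :=
  let dic : PySem.Dict Int Int :=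
    ([1, 2, 3, 4, 5, 6] : List Int).foldl (fun d v => d.insert v 0) PySem.Dict.empty
  let ys := PySem.List.sorted x (fun a => a) false
  let n := ys.length
  (pvRunLoopB ys n 0 dic).items

-- ===== PRECONDITION & SPEC =====
def Spec_calcula_pontos_regra_simples (x : List Int) (out : List (Int × Int)) : Prop := out = calcula_pontos_regra_simples_alt x
instance (x : List Int) (out : List (Int × Int)) : Decidable (Spec_calcula_pontos_regra_simples x out) := by unfold Spec_calcula_pontos_regra_simples; infer_instance

-- ===== CLAIM (what is proved, stated in full; the proofs are below) =====
def Claim_equal_calcula_pontos_regra_simples : Prop := ∀ (x : List Int), Dom_calcula_pontos_regra_simples x → Spec_calcula_pontos_regra_simples x (calcula_pontos_regra_simples x)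

-- ===== LEMMAS AND PROOFS =====

-- proof-side view of B's outer loop: runs of the sorted suffix, consumed structurally
def pvRunLoop (ys : List Int) (dic : PySem.Dict Int Int) : PySem.Dict Int Int :=
  match ys with
  | [] => dic
  | v :: rest =>
      let k : Int := 1 + (rest.takeWhile (fun w => w == v)).length
      let dic' := if dic.contains v then dic.insert v (k * v) else dic
      pvRunLoop (rest.dropWhile (fun w => w == v)) dic'
termination_by ys.length
decreasing_by
  simp only [List.length_cons]
  exact Nat.lt_succ_of_le (rest.length_dropWhile_le _)

-- in a sorted list whose elements are all ≥ v, the leading run of v's is ALL the v's: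
-- its length is the count of v, and after dropping it no v remains while other counts are kept
theorem pv_run_facts (ys : List Int) (hs : ys.Pairwise (· ≤ ·)) (v : Int)
    (hlb : ∀ w ∈ ys, v ≤ w) :
    (ys.takeWhile (fun w => w == v)).length = ys.count v ∧
    (ys.dropWhile (fun w => w == v)).Pairwise (· ≤ ·) ∧
    (∀ w : Int, (ys.dropWhile (fun w => w == v)).count w
        = if w = v then 0 else ys.count w) := by
  induction ys with
  | nil => simp
  | cons a t ih =>
    rcases List.pairwise_cons.mp hs with ⟨hat, hts⟩
    by_cases hav : a = v
    · subst hav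
      have hlb' : ∀ w ∈ t, a ≤ w := fun w hw => hat w hw
      obtain ⟨h1, h2, h3⟩ := ih hts hlb'
      refine ⟨?_, ?_, ?_⟩
      · simp [h1]
      · simpa [List.dropWhile_cons] using h2
      · intro w
        rcases h3 w with _
        by_cases hw : w = a
        · subst hw; simpa [List.dropWhile_cons] using h3 w
        · have : (a == w) = false := by simp [Ne.symm hw]
          simp only [List.dropWhile_cons, beq_self_eq_true, if_true]
          rw [h3 w, List.count_cons, this]
          simp [hw]
    · have hva : v < a := lt_of_le_of_ne (hlb a (by simp)) (Ne.symm hav)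
      have hnot : ∀ w ∈ a :: t, w ≠ v := by
        intro w hw
        rcases List.mem_cons.mp hw with h | h
        · subst h; exact Ne.symm (ne_of_lt hva)
        · exact Ne.symm (ne_of_lt (lt_of_lt_of_le hva (hat w h)))
      have hcv : (a :: t).count v = 0 := List.count_eq_zero.mpr (fun h => hnot v h rfl)
      have haf : (a == v) = false := by simp [hav]
      refine ⟨?_, ?_, ?_⟩
      · simp [haf, hcv]
      · simpa [List.dropWhile_cons, haf] using hs
      · intro w
        simp only [List.dropWhile_cons, haf]
        by_cases hw : w = v
        · subst hw; simp [hcv]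
        · simp [hw]

theorem pv_keys_insert_of_contains (d : PySem.Dict Int Int) (k v : Int)
    (h : d.contains k = true) : (d.insert k v).keys = d.keys := by
  simp only [PySem.Dict.keys, PySem.Dict.items_insert_of_contains d v h, List.map_map]
  apply List.map_congr_left
  intro p _
  simp only [Function.comp_apply]
  by_cases hp : p.1 = k
  · simp [hp]
  · simp [hp]

theorem pvRunLoop_nil (d : PySem.Dict Int Int) : pvRunLoop [] d = d := by
  rw [pvRunLoop]

theorem pvRunLoop_cons (v : Int) (rest : List Int) (d : PySem.Dict Int Int) :
    pvRunLoop (v :: rest) d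
      = pvRunLoop (rest.dropWhile (fun w => w == v))
          (if d.contains v
           then d.insert v ((1 + ((rest.takeWhile (fun w => w == v)).length : Int)) * v)
           else d) := by
  rw [pvRunLoop]

theorem pv_runLoop_keys_n : ∀ (n : Nat) (ys : List Int) (d : PySem.Dict Int Int),
    ys.length ≤ n → (pvRunLoop ys d).keys = d.keys := by
  intro n
  induction n with
  | zero =>
    intro ys d h
    have : ys = [] := List.eq_nil_of_length_eq_zero (Nat.le_zero.mp h)
    subst this; rw [pvRunLoop_nil]
  | succ m ih =>
    intro ys d h
    match ys with
    | [] => rw [pvRunLoop_nil]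
    | v :: rest =>
      rw [pvRunLoop_cons]
      have hlen : (rest.dropWhile (fun w => w == v)).length ≤ m := by
        have := rest.length_dropWhile_le (fun w => w == v)
        simp only [List.length_cons] at h
        omega
      rw [ih _ _ hlen]
      split
      · exact pv_keys_insert_of_contains _ _ _ (by assumption)
      · rfl

theorem pv_runLoop_keys (ys : List Int) (d : PySem.Dict Int Int) :
    (pvRunLoop ys d).keys = d.keys :=
  pv_runLoop_keys_n ys.length ys d (Nat.le_refl _)

theorem pv_runLoop_getD_n : ∀ (n : Nat) (ys : List Int), ys.length ≤ n →
    ys.Pairwise (· ≤ ·) → ∀ (d : PySem.Dict Int Int) (v : Int),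
    (pvRunLoop ys d).getD v 0
      = if 0 < ys.count v ∧ d.contains v = true then (ys.count v : Int) * v
        else d.getD v 0 := by
  intro n
  induction n with
  | zero =>
    intro ys h _ d v
    have : ys = [] := List.eq_nil_of_length_eq_zero (Nat.le_zero.mp h)
    subst this; rw [pvRunLoop_nil]; simp
  | succ m ih =>
    intro ys h hs d v
    match ys with
    | [] => rw [pvRunLoop_nil]; simp
    | v0 :: rest =>
      rcases List.pairwise_cons.mp hs with ⟨h0, hts⟩
      obtain ⟨h1, h2, h3⟩ := pv_run_facts rest hts v0 (fun w hw => h0 w hw)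
      set d' : PySem.Dict Int Int :=
        if d.contains v0
        then d.insert v0 ((1 + ((rest.takeWhile (fun w => w == v0)).length : Int)) * v0)
        else d with hd'
      have hlen : (rest.dropWhile (fun w => w == v0)).length ≤ m := by
        have := rest.length_dropWhile_le (fun w => w == v0)
        simp only [List.length_cons] at h
        omega
      have hcont : d'.contains v = d.contains v := by
        rw [PySem.Dict.contains_eq_decide_mem_keys, PySem.Dict.contains_eq_decide_mem_keys]
        have : d'.keys = d.keys := by
          rw [hd']
          split
          · exact pv_keys_insert_of_contains _ _ _ (by assumption)
          · rfl
        rw [this]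
      rw [pvRunLoop_cons, ih _ hlen h2 d' v, hcont]
      by_cases hv : v = v0
      · subst hv
        rw [h3 v, if_pos rfl]
        simp only [Nat.lt_irrefl, false_and, if_false]
        have hcnt : (((v :: rest).count v : Nat) : Int)
            = 1 + ((rest.takeWhile (fun w => w == v)).length : Int) := by
          rw [List.count_cons, h1]
          simp
          ring
        by_cases hc : d.contains v = true
        · rw [hd', if_pos hc, PySem.Dict.getD_insert, if_pos rfl]
          have hcpos : (0 < (v :: rest).count v ∧ d.contains v = true) := by
            constructor
            · simp
            · exact hc
          rw [if_pos hcpos, hcnt]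
        · have hc' : d.contains v = false := by simpa using hc
          rw [hd', if_neg (by simp [hc']), if_neg (by simp [hc'])]
      · have hv0 : (v0 == v) = false := by simp [Ne.symm hv]
        rw [h3 v, if_neg hv]
        have hcnt : (v0 :: rest).count v = rest.count v := by
          rw [List.count_cons, hv0]; simp
        have hgd : d'.getD v 0 = d.getD v 0 := by
          rw [hd']
          split
          · rw [PySem.Dict.getD_insert, if_neg hv]
          · rfl
        rw [hgd, hcnt]

theorem pv_runLoop_getD (ys : List Int) (hs : ys.Pairwise (· ≤ ·))
    (d : PySem.Dict Int Int) (v : Int) :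
    (pvRunLoop ys d).getD v 0
      = if 0 < ys.count v ∧ d.contains v = true then (ys.count v : Int) * v
        else d.getD v 0 :=
  pv_runLoop_getD_n ys.length ys (Nat.le_refl _) hs d v

-- the per-face score A computes
theorem pv_val (x : List Int) (v : Int) :
    (if !(x.contains v) then (0 : Int) else (PySem.List.count x v : Int) * v)
      = (x.count v : Int) * v := by
  by_cases h : x.contains v = true
  · have hb : (!x.contains v) = false := by rw [h]; rfl
    rw [hb]
    simp [PySem.List.count]
  · have hb : x.contains v = false := by simpa using h
    have hm : v ∉ x := by simpa using h
    rw [hb]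
    simp [List.count_eq_zero.mpr hm]

theorem pv_A_eq (x : List Int) :
    calcula_pontos_regra_simples x
      = [(1, (x.count 1 : Int) * 1), (2, (x.count 2 : Int) * 2), (3, (x.count 3 : Int) * 3),
         (4, (x.count 4 : Int) * 4), (5, (x.count 5 : Int) * 5), (6, (x.count 6 : Int) * 6)] := by
  unfold calcula_pontos_regra_simples
  have hstep : (fun (dic : PySem.Dict Int Int) (valor : Int) =>
      if !(x.contains valor) then dic.insert valor 0
      else dic.insert valor ((PySem.List.count x valor : Int) * valor))
    = fun dic valor => dic.insert valor
        (if !(x.contains valor) then 0 else (PySem.List.count x valor : Int) * valor) := by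
    funext dic valor
    split <;> rfl
  rw [hstep]
  have h6 := PySem.Dict.items_foldl_insert_fresh ([1,2,3,4,5,6] : List Int) id
      (fun valor => if !(x.contains valor) then 0 else (PySem.List.count x valor : Int) * valor)
      PySem.Dict.empty (by intro a _; simp) (by decide)
  simp only [id_eq] at h6
  rw [h6]
  simp only [List.map_cons, List.map_nil]
  simp only [pv_val]
  rfl

-- the index loops of the port are the structural run consumption of pvRunLoop
theorem pv_dropWhile_eq_drop (p : Int → Bool) (l : List Int) :
    l.dropWhile p = l.drop (l.takeWhile p).length := by
  induction l with
  | nil => rfl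
  | cons a t ih =>
    by_cases h : p a = true
    · simp [h, ih]
    · have h' : p a = false := by simpa using h
      simp [h']

theorem pvInnerB_eq_n : ∀ (k : Nat) (ys : List Int) (v : Int) (j : Nat),
    ys.length - j ≤ k →
    pvInnerB ys ys.length v j = j + ((ys.drop j).takeWhile (fun w => w == v)).length := by
  intro k
  induction k with
  | zero =>
    intro ys v j h
    rw [pvInnerB]
    have hj : ¬ j < ys.length := by omega
    rw [dif_neg (by omega)]
    rw [List.drop_eq_nil_of_le (by omega)]
    simp
  | succ m ih =>
    intro ys v j h
    rw [pvInnerB]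
    by_cases hj : j < ys.length
    · have hdrop : ys.drop j = ys[j] :: ys.drop (j + 1) := List.drop_eq_getElem_cons hj
      have hgd : ys.getD j 0 = ys[j] := List.getD_eq_getElem ys 0 hj
      by_cases hv : ys[j] = v
      · rw [dif_pos ⟨hj, by rw [hgd, hv]⟩, ih ys v (j + 1) (by omega)]
        rw [hdrop, List.takeWhile_cons, if_pos (by simp [hv])]
        simp only [List.length_cons]
        omega
      · rw [dif_neg (by rw [hgd]; exact fun hc => hv hc.2)]
        rw [hdrop, List.takeWhile_cons, if_neg (by simp [hv])]
        simp
    · rw [dif_neg (by omega)]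
      rw [List.drop_eq_nil_of_le (by omega)]
      simp

theorem pvRunLoopB_eq_n : ∀ (k : Nat) (ys : List Int) (i : Nat) (d : PySem.Dict Int Int),
    ys.length - i ≤ k →
    pvRunLoopB ys ys.length i d = pvRunLoop (ys.drop i) d := by
  intro k
  induction k with
  | zero =>
    intro ys i d h
    rw [pvRunLoopB, dif_neg (by omega), List.drop_eq_nil_of_le (by omega), pvRunLoop_nil]
  | succ m ih =>
    intro ys i d h
    rw [pvRunLoopB]
    by_cases hi : i < ys.length
    · rw [dif_pos hi]
      have hdrop : ys.drop i = ys[i] :: ys.drop (i + 1) := List.drop_eq_getElem_cons hi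
      have hgd : ys.getD i 0 = ys[i] := List.getD_eq_getElem ys 0 hi
      set L := ((ys.drop (i + 1)).takeWhile (fun w => w == ys[i])).length with hL
      have hj : pvInnerB ys ys.length (ys.getD i 0) (i + 1) = (i + 1) + L := by
        rw [hgd]
        exact pvInnerB_eq_n (ys.length) ys ys[i] (i + 1) (by omega)
      have hLle : L ≤ (ys.drop (i + 1)).length := by
        rw [hL]; exact (List.takeWhile_sublist _).length_le
      have hdj : ys.drop ((i + 1) + L) = (ys.drop (i + 1)).dropWhile (fun w => w == ys[i]) := by
        rw [pv_dropWhile_eq_drop, ← hL, List.drop_drop]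
      rw [hj, ih ys ((i + 1) + L) _ (by omega), hdj, hdrop, pvRunLoop_cons]
      congr 2
      rw [hgd]
      congr 2
      push_cast
      ring
    · rw [dif_neg hi, List.drop_eq_nil_of_le (by omega), pvRunLoop_nil]

-- B's initial dict {1:0, ..., 6:0}
def pvD0 : PySem.Dict Int Int :=
  ([1, 2, 3, 4, 5, 6] : List Int).foldl (fun d v => d.insert v 0) PySem.Dict.empty

theorem pv_B_eq (x : List Int) :
    calcula_pontos_regra_simples_alt x
      = [(1, (x.count 1 : Int) * 1), (2, (x.count 2 : Int) * 2), (3, (x.count 3 : Int) * 3),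
         (4, (x.count 4 : Int) * 4), (5, (x.count 5 : Int) * 5), (6, (x.count 6 : Int) * 6)] := by
  show (pvRunLoopB (PySem.List.sorted x (fun a => a) false)
      (PySem.List.sorted x (fun a => a) false).length 0 pvD0).items = _
  set ys := PySem.List.sorted x (fun a => a) false with hys
  rw [pvRunLoopB_eq_n ys.length ys 0 pvD0 (by omega), List.drop_zero]
  have hsorted : ys.Pairwise (· ≤ ·) := by
    simpa using PySem.List.sorted_pairwise x (fun a => a)
  have hperm : ys.Perm x := PySem.List.sorted_perm x (fun a => a) false
  have hcount : ∀ v : Int, ys.count v = x.count v := fun v => hperm.count_eq v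
  have hkeys : (pvRunLoop ys pvD0).keys = ([1,2,3,4,5,6] : List Int) := by
    rw [pv_runLoop_keys]; decide
  have hnd : (pvRunLoop ys pvD0).keys.Nodup := by rw [hkeys]; decide
  have hv : ∀ v : Int, v ∈ ([1,2,3,4,5,6] : List Int) →
      (pvRunLoop ys pvD0).getD v 0 = (x.count v : Int) * v := by
    intro v hvmem
    rw [pv_runLoop_getD ys hsorted pvD0 v, hcount v]
    have hc : pvD0.contains v = true := by
      fin_cases hvmem <;> decide
    have hg : pvD0.getD v 0 = 0 := by
      fin_cases hvmem <;> decide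
    by_cases h0 : 0 < x.count v
    · rw [if_pos ⟨h0, hc⟩]
    · have : x.count v = 0 := Nat.eq_zero_of_not_pos h0
      rw [if_neg (by simp [this]), hg, this]
      simp
  rw [PySem.Dict.items_eq_map_keys _ hnd 0, hkeys]
  simp only [List.map]
  rw [hv 1 (by decide), hv 2 (by decide), hv 3 (by decide),
    hv 4 (by decide), hv 5 (by decide), hv 6 (by decide)]

-- ===== VERDICT (by name: the statement is the Claim_ definition above) =====
theorem calcula_pontos_regra_simples_spec : Claim_equal_calcula_pontos_regra_simples := by
  intro x _
  unfold Spec_calcula_pontos_regra_simples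
  rw [pv_A_eq, pv_B_eq]
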